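-- pv_equiv track=rewrite | github.com/SakuraMathcraft/LaTeXSnipper | src/core/mathcraft_tex_exporter.py | _escape_markdown_text
-- ===== SOURCE A (Python) =====
-- def _escape_markdown_text(text: str) -> str:
--     result: list[str] = []
--     pos = 0
--     while pos < len(text):
--         start = text.find("**", pos)
--         if start < 0:
--             result.append(_escape_latex_text(text[pos:]))
--             break
--         end = text.find("**", start + 2)
--         if end < 0:
--             result.append(_escape_latex_text(text[pos:]))
--             break
--         result.append(_escape_latex_text(text[pos:start]))
--         bold_text = text[start + 2 : end].strip()
--         result.append(f"\\textbf{{{_escape_latex_text(bold_text)}}}")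
--         pos = end + 2
--     return "".join(result)
--
-- def _escape_latex_text(text: str) -> str:
--     replacements = {
--         "\\": r"\textbackslash{}",
--         "&": r"\&",
--         "%": r"\%",
--         "#": r"\#",
--         "_": r"\_",
--         "{": r"\{",
--         "}": r"\}",
--         "~": r"\textasciitilde{}",
--         "^": r"\textasciicircum{}",
--     }
--     return "".join(replacements.get(ch, ch) for ch in text)
-- ===== SOURCE B (Python) =====
-- def _escape_latex_text(text: str) -> str:
--     replacements = {
--         "\\": r"\textbackslash{}",
--         "&": r"\&",
--         "%": r"\%",
--         "#": r"\#",
--         "_": r"\_",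
--         "{": r"\{",
--         "}": r"\}",
--         "~": r"\textasciitilde{}",
--         "^": r"\textasciicircum{}",
--     }
--     return "".join(replacements.get(ch, ch) for ch in text)
--
--
-- def _escape_markdown_text(text: str) -> str:
--     parts = text.split("**")
--     if len(parts) % 2 == 0:
--         # the final "**" is unmatched: keep it as literal text
--         parts[-2:] = [parts[-2] + "**" + parts[-1]]
--     out = []
--     bold = False
--     for part in parts:
--         if bold:
--             out.append(f"\\textbf{{{_escape_latex_text(part.strip())}}}")
--         else:
--             out.append(_escape_latex_text(part))
--         bold = not bold
--     return "".join(out)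
-- ===== Notes on version B (the rewrite author's own statement) =====
-- stated objective: simpler
-- what changed: Replaces A's manual find/pos while-loop over absolute string positions with a single split on the double-star delimiter (merging an unmatched trailing delimiter back into the last plain segment) followed by a uniform alternating plain/bold pass over the segments.
import Mathlib
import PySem

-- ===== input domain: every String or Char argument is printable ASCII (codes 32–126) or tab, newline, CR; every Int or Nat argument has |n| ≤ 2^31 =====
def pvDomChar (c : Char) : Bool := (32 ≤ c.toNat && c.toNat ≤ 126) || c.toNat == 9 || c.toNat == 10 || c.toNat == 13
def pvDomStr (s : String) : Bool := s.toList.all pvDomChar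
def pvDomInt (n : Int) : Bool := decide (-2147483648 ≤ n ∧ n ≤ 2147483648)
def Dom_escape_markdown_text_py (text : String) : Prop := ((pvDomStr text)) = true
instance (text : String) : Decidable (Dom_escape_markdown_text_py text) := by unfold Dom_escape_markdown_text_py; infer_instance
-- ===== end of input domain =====

-- B replaces A's manual find/pos scanning loop by one split on "**" plus a uniform
-- alternating pass over the segments (objective: simpler/idiomatic; same output).

-- ===== PORT A =====

-- shared helper: _escape_latex_text, identical in both Pythons (per-character replacement)
def escLatexChar (c : Char) : List Char :=
  if c = '\\' then "\\textbackslash{}".toList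
  else if c = '&' then "\\&".toList
  else if c = '%' then "\\%".toList
  else if c = '#' then "\\#".toList
  else if c = '_' then "\\_".toList
  else if c = '{' then "\\{".toList
  else if c = '}' then "\\}".toList
  else if c = '~' then "\\textasciitilde{}".toList
  else if c = '^' then "\\textasciicircum{}".toList
  else [c]

def escLatex (cs : List Char) : List Char := cs.flatMap escLatexChar

-- text.find("**", pos), expressed on the remaining suffix text[pos:]
def findStars : List Char → Option Nat
  | [] => none
  | c :: rest =>
    if (c :: rest).take 2 = ['*', '*'] then some 0
    else (findStars rest).map (· + 1)

theorem findStars_le {cs : List Char} {i : Nat} (h : findStars cs = some i) :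
    i + 2 ≤ cs.length := by
  induction cs generalizing i with
  | nil => simp [findStars] at h
  | cons c rest ih =>
    simp only [findStars] at h
    split at h
    · rename_i ht
      cases h
      rcases rest with _ | ⟨d, rest'⟩ <;> simp_all [List.take]
    · rcases heq : findStars rest with _ | j <;> rw [heq] at h <;> simp at h
      subst h
      have := ih heq
      simp; omega

-- A's while loop over the suffix text[pos:]
def loopA (cs : List Char) : List Char :=
  match _h1 : findStars cs with
  | none => escLatex cs
  | some i =>
    match _h2 : findStars (cs.drop (i + 2)) with
    | none => escLatex cs
    | some j =>
      escLatex (cs.take i) ++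
        ("\\textbf{".toList ++ escLatex (PySem.Chars.strip ((cs.drop (i + 2)).take j)) ++ "}".toList) ++
        loopA ((cs.drop (i + 2)).drop (j + 2))
termination_by cs.length
decreasing_by
  have hi := findStars_le _h1
  have hj := findStars_le _h2
  simp_all
  omega

def escape_markdown_text_py (text : String) : String := String.ofList (loopA text.toList)

-- ===== PORT B =====

-- text.split("**")
def splitStars : List Char → List (List Char)
  | [] => [[]]
  | c :: rest =>
    if (c :: rest).take 2 = ['*', '*'] then [] :: splitStars rest.tail
    else
      match splitStars rest with
      | h :: t => (c :: h) :: t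
      | [] => [[c]]
termination_by cs => cs.length
decreasing_by all_goals (simp [List.length_tail]; try omega)

-- if len(parts) % 2 == 0: merge the last two parts around a literal "**"
def fixupParts : List (List Char) → List (List Char)
  | [p, q] => [p ++ '*' :: '*' :: q]
  | p :: q :: rest => p :: q :: fixupParts rest
  | l => l

-- the alternating (bold-flag) pass over the parts
def procParts (bold : Bool) : List (List Char) → List Char
  | [] => []
  | p :: rest =>
    (if bold then "\\textbf{".toList ++ escLatex (PySem.Chars.strip p) ++ "}".toList
     else escLatex p) ++ procParts (!bold) rest

def escape_markdown_text_py_alt (text : String) : String :=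
  String.ofList (procParts false (fixupParts (splitStars text.toList)))

-- ===== PRECONDITION & SPEC =====
def Spec_escape_markdown_text_py (text : String) (out : String) : Prop := out = escape_markdown_text_py_alt text
instance (text : String) (out : String) : Decidable (Spec_escape_markdown_text_py text out) := by unfold Spec_escape_markdown_text_py; infer_instance

-- ===== CLAIM (what is proved, stated in full; the proofs are below) =====
def Claim_equal_escape_markdown_text_py : Prop := ∀ (text : String), Dom_escape_markdown_text_py text → Spec_escape_markdown_text_py text (escape_markdown_text_py text)

-- ===== LEMMAS AND PROOFS =====

theorem splitStars_ne_nil (cs : List Char) : splitStars cs ≠ [] := by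
  rw [splitStars.eq_def]
  split
  · simp
  · split
    · simp
    · split <;> simp

theorem splitStars_of_none {cs : List Char} (h : findStars cs = none) :
    splitStars cs = [cs] := by
  induction cs with
  | nil => simp [splitStars]
  | cons c rest ih =>
    simp only [findStars] at h
    split at h
    · simp at h
    · rename_i ht
      rcases heq : findStars rest with _ | j
      · rw [splitStars.eq_def]
        simp only [ht, if_false]
        rw [ih heq]
      · rw [heq] at h; simp at h

theorem splitStars_of_some {cs : List Char} {i : Nat} (h : findStars cs = some i) :
    splitStars cs = cs.take i :: splitStars (cs.drop (i + 2)) := by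
  induction cs generalizing i with
  | nil => simp [findStars] at h
  | cons c rest ih =>
    simp only [findStars] at h
    split at h
    · rename_i ht
      cases h
      rcases rest with _ | ⟨d, rest'⟩
      · simp [List.take] at ht
      · simp [List.take] at ht
        obtain ⟨hc, hd⟩ := ht
        subst hc hd
        rw [splitStars.eq_def]
        simp
    · rename_i ht
      rcases heq : findStars rest with _ | j <;> rw [heq] at h <;> simp at h
      subst h
      rw [splitStars.eq_def]
      simp only [ht, if_false]
      rw [ih heq]
      simp

theorem findStars_reconstruct {cs : List Char} {i : Nat} (h : findStars cs = some i) :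
    cs = cs.take i ++ '*' :: '*' :: cs.drop (i + 2) := by
  induction cs generalizing i with
  | nil => simp [findStars] at h
  | cons c rest ih =>
    simp only [findStars] at h
    split at h
    · rename_i ht
      cases h
      rcases rest with _ | ⟨d, rest'⟩
      · simp [List.take] at ht
      · simp [List.take] at ht
        obtain ⟨hc, hd⟩ := ht
        subst hc hd
        simp
    · rcases heq : findStars rest with _ | j <;> rw [heq] at h <;> simp at h
      subst h
      simpa using congrArg (c :: ·) (ih heq)

theorem fixupParts_cons_cons {p q : List Char} {rs : List (List Char)} (h : rs ≠ []) :
    fixupParts (p :: q :: rs) = p :: q :: fixupParts rs := by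
  rcases rs with _ | ⟨r, rs'⟩
  · simp at h
  · rfl

theorem loopA_eq (cs : List Char) :
    loopA cs = procParts false (fixupParts (splitStars cs)) := by
  induction hn : cs.length using Nat.strong_induction_on generalizing cs with
  | _ n ih =>
  subst hn
  rw [loopA.eq_def]
  split
  · rename_i h1
    rw [splitStars_of_none h1]
    simp [fixupParts, procParts]
  · rename_i i h1
    split
    · -- second ** missing: whole suffix is plain text
      rename_i h2
      rw [splitStars_of_some h1, splitStars_of_none h2]
      have hrec := findStars_reconstruct h1
      simp only [fixupParts, procParts]
      rw [if_neg (by simp)]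
      conv_lhs => rw [hrec]
      simp [escLatex]
    · rename_i j h2
      have hsp2 := splitStars_of_some h2
      rw [splitStars_of_some h1, hsp2,
        fixupParts_cons_cons (splitStars_ne_nil _)]
      have hi := findStars_le h1
      have hj := findStars_le h2
      have hlt : ((cs.drop (i + 2)).drop (j + 2)).length < cs.length := by
        simp at hi hj ⊢
        omega
      rw [ih _ hlt _ rfl]
      simp [procParts]

-- ===== VERDICT (by name: the statement is the Claim_ definition above) =====
theorem escape_markdown_text_py_spec : Claim_equal_escape_markdown_text_py := by
  intro text _
  unfold Spec_escape_markdown_text_py escape_markdown_text_py escape_markdown_text_py_alt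
  rw [loopA_eq]
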